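-- pv_equiv track=rewrite | github.com/hankyeolyu/vilab_hw | ex08.py | solution
-- ===== SOURCE A (Python) =====
-- def solution(n):
--     answer = []
--     tmp = 0
--     while n > 0:
--         tmp = n % 10
--         n = int((n - tmp) / 10)
--         answer.append(tmp)
--     return answer
-- ===== SOURCE B (Python) =====
-- def solution(n):
--     if n <= 0:
--         return []
--     return [int(d) for d in reversed(str(n))]
-- ===== Notes on version B (the rewrite author's own statement) =====
-- stated objective: idiomatic
-- what changed: B extracts the digits from the decimal string representation str(n) traversed back to front, instead of A's arithmetic loop of repeated %10 and division.
import Mathlib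
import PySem

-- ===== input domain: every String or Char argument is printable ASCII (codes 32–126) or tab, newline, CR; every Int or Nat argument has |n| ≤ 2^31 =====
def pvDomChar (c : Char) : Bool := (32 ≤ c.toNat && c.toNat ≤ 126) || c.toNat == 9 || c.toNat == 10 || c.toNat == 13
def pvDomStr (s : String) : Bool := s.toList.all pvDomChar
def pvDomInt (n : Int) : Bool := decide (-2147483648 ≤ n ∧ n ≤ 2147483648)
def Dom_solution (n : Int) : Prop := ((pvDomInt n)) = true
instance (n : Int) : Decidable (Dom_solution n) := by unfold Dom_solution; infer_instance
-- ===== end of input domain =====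

-- B reads the digits off the decimal string str(n) back to front instead of A's %10/division loop (idiomatic; same cost).

-- ===== PORT A =====
-- while n > 0: tmp = n % 10; n = int((n - tmp) / 10); answer.append(tmp)
-- int((n - tmp) / 10) is ported as floor division: n - tmp is an exact multiple of 10 and
-- |n| ≤ 2^31 < 2^53, so Python's float true division is exact there and int() truncates nothing.
def solutionGo (n : Int) (answer : List Int) : List Int :=
  if 0 < n then
    -- tmp = n % 10 is inlined into its two uses
    solutionGo (PySem.Int.floordiv (n - PySem.Int.mod n 10) 10)
      (answer ++ [PySem.Int.mod n 10])
  else answer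
termination_by n.toNat
decreasing_by
  simp only [PySem.Int.mod, PySem.Int.floordiv]
  rw [Int.fmod_eq_emod, Int.fdiv_eq_ediv,
    if_pos (Or.inl (by norm_num : (0:Int) ≤ 10)), if_pos (Or.inl (by norm_num : (0:Int) ≤ 10))]
  omega

def solution (n : Int) : List Int := solutionGo n []

-- ===== PORT B =====
-- [int(d) for d in reversed(str(n))]; int(d) on a single decimal-digit character d is
-- ported exactly as its character code minus 48 (str(n) of a positive int is all digits).
def solution_alt (n : Int) : List Int :=
  if n ≤ 0 then []
  else ((PySem.Int.toStr n).toList.reverse).map (fun c => ((c.toNat : Int) - 48))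

-- ===== PRECONDITION & SPEC =====
def Spec_solution (n : Int) (out : List Int) : Prop := out = solution_alt n
instance (n : Int) (out : List Int) : Decidable (Spec_solution n out) := by unfold Spec_solution; infer_instance

-- ===== CLAIM (what is proved, stated in full; the proofs are below) =====
def Claim_equal_solution : Prop := ∀ (n : Int), Dom_solution n → Spec_solution n (solution n)

-- ===== LEMMAS AND PROOFS =====

lemma digitChar_toNat {d : Nat} (h : d < 10) : (Nat.digitChar d).toNat = d + 48 := by
  interval_cases d <;> decide

lemma toDigitsCore_eq (f : Nat) : ∀ (n : Nat) (acc : List Char), 0 < n → n ≤ f →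
    Nat.toDigitsCore 10 f n acc = ((Nat.digits 10 n).map Nat.digitChar).reverse ++ acc := by
  induction f with
  | zero => intro n acc hn hf; omega
  | succ f ih =>
    intro n acc hn hf
    rw [Nat.digits_def' (by norm_num : 1 < 10) hn]
    simp only [Nat.toDigitsCore]
    by_cases h : n / 10 = 0
    · simp [h]
    · rw [if_neg h, ih (n / 10) _ (Nat.pos_of_ne_zero h) (by omega)]
      simp

lemma solutionGo_eq (n : Int) (acc : List Int) :
    solutionGo n acc = acc ++ (Nat.digits 10 n.toNat).map (fun d : Nat => (d : Int)) := by
  induction n, acc using solutionGo.induct with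
  | case1 n acc hpos ih =>
    rw [solutionGo, if_pos hpos, ih]
    have hm : PySem.Int.mod n 10 = ((n.toNat % 10 : Nat) : Int) := by
      unfold PySem.Int.mod
      rw [Int.fmod_eq_emod, if_pos (Or.inl (by norm_num : (0:Int) ≤ 10))]
      omega
    have hnext : (PySem.Int.floordiv (n - PySem.Int.mod n 10) 10).toNat = n.toNat / 10 := by
      unfold PySem.Int.mod PySem.Int.floordiv
      rw [Int.fmod_eq_emod, Int.fdiv_eq_ediv,
        if_pos (Or.inl (by norm_num : (0:Int) ≤ 10)), if_pos (Or.inl (by norm_num : (0:Int) ≤ 10))]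
      omega
    rw [hnext, hm]
    conv_rhs => rw [Nat.digits_def' (by norm_num : 1 < 10) (show 0 < n.toNat by omega)]
    simp
  | case2 n acc hpos =>
    rw [solutionGo, if_neg hpos]
    have : n.toNat = 0 := by omega
    simp [this]

theorem solution_spec_aux (n : Int) : solution n = solution_alt n := by
  unfold solution solution_alt
  rw [solutionGo_eq]
  by_cases h : n ≤ 0
  · have : n.toNat = 0 := by omega
    simp [h, this]
  · rw [if_neg h, PySem.Int.toList_toStr]
    unfold PySem.Int.toChars
    rw [if_neg (by omega), Nat.toDigits,
      toDigitsCore_eq _ _ _ (by omega) (by omega)]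
    rw [List.append_nil, List.reverse_reverse, List.map_map, List.nil_append]
    refine List.map_congr_left (fun d hd => ?_)
    have hd10 : d < 10 := Nat.digits_lt_base (by norm_num) hd
    have := digitChar_toNat hd10
    simp only [Function.comp_apply, this]
    push_cast
    ring

-- ===== VERDICT (by name: the statement is the Claim_ definition above) =====
theorem solution_spec : Claim_equal_solution := by
  intro n _
  exact solution_spec_aux n
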